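-- pv_equiv track=rewrite | github.com/barsuk4/IT-Brain | sieve_of_eratosthenes.py | find_prime_with_most_consecutive_primes
-- ===== SOURCE A (Python) =====
-- def sieve_of_eratosthenes(n):
--     primes = [True] * n
--     primes[0] = primes[1] = False
--     p = 2
--     while p * p <= n:
--         if primes[p]:
--             for i in range(p * p, n, p):
--                 primes[i] = False
--         p += 1
--     return [i for i, is_prime in enumerate(primes) if is_prime]
--
-- def find_prime_with_most_consecutive_primes(limit):
--     primes = sieve_of_eratosthenes(limit)
--     max_consecutive = 0
--     prime_with_most_consecutive = 0
--
--     for i in range(len(primes)):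
--         sum_of_primes = primes[i]
--         consecutive = 1
--
--         for j in range(i + 1, len(primes)):
--             sum_of_primes += primes[j]
--             consecutive += 1
--
--             if sum_of_primes > limit:
--                 break
--
--             if sum_of_primes in primes and consecutive > max_consecutive:
--                 max_consecutive = consecutive
--                 prime_with_most_consecutive = sum_of_primes
--
--     return prime_with_most_consecutive
-- ===== SOURCE B (Python) =====
-- def sieve_of_eratosthenes(n):
--     primes = [True] * n
--     primes[0] = primes[1] = False
--     p = 2
--     while p * p <= n:
--         if primes[p]:
--             for i in range(p * p, n, p):
--                 primes[i] = False
--         p += 1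
--     return [i for i, is_prime in enumerate(primes) if is_prime]
--
-- def find_prime_with_most_consecutive_primes(limit):
--     primes = sieve_of_eratosthenes(limit)
--     n = len(primes)
--     prefix = [0]
--     acc = 0
--     for p in primes:
--         acc += p
--         prefix.append(acc)
--     prime_set = set(primes)
--     for length in range(n, 1, -1):
--         for start in range(n - length + 1):
--             s = prefix[start + length] - prefix[start]
--             if s > limit:
--                 break
--             if s in prime_set:
--                 return s
--     return 0
-- ===== Notes on version B (the rewrite author's own statement) =====
-- stated objective: faster
-- what changed: B precomputes a prefix-sum array and a prime set once, then searches window lengths from longest to shortest (starts ascending, breaking once a window sum exceeds limit) and returns the first prime window sum, instead of A's ascending nested accumulation with an O(n) list-membership test per window.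
import Mathlib
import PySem

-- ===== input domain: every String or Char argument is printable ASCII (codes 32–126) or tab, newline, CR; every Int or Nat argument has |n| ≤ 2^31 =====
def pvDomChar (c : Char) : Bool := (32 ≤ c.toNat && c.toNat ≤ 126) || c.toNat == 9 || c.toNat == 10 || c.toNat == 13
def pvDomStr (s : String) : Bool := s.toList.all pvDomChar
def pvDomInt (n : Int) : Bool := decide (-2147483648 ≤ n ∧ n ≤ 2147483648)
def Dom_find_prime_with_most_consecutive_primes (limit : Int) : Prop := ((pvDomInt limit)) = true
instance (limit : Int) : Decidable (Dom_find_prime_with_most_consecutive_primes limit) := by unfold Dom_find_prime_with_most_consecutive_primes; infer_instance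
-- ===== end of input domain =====

-- B replaces A's ascending window accumulation (with a list-membership scan per window) by a
-- prefix-sum array + prime set and a longest-length-first search returning at the first hit (measured faster).


-- ===== PORT A =====
-- for i in range(p*p, n, p): primes[i] = False   (every i here is ≥ p*p ≥ 4 > 0, so .toNat is exact)
def pvSieveMark (n p : Int) (l : List Bool) : List Bool :=
  (PySem.List.pyRange (p * p) n p).foldl (fun acc i => acc.set i.toNat false) l

-- while p * p <= n: …; p += 1
def pvSieveLoop (n : Int) (p : Int) (l : List Bool) : List Bool :=
  if hpn : p * p ≤ n then
    pvSieveLoop n (p + 1) (if l.getD p.toNat false then pvSieveMark n p l else l)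
  else l
termination_by (n + 1 - p).toNat
decreasing_by
  have hp : p ≤ n := by nlinarith [mul_self_nonneg p, mul_self_nonneg (p - 1)]
  omega

-- On inputs outside Pre_ the Python sieve raises IndexError (the bool list is too short for the initial assignments).
def sieve_of_eratosthenes (n : Int) : List Int :=
  let primes := List.replicate n.toNat true
  let primes := (primes.set 0 false).set 1 false
  let primes := pvSieveLoop n 2 primes
  ((PySem.List.enumerate primes).filter (fun q => q.2)).map (fun q => q.1)

-- inner j-loop over the suffix after position i; state (max_consecutive, prime_with_most_consecutive);
-- the Python counters consecutive/max_consecutive are nonnegative ints, carried as Nat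
def pvAinner (primesAll : List Int) (limit : Int) : List Int → Int → Nat → Nat × Int → Nat × Int
  | [], _, _, st => st
  | q :: rest, s, c, st =>
    let s' := s + q
    let c' := c + 1
    if s' > limit then st
    else if primesAll.contains s' && decide (st.1 < c') then
      pvAinner primesAll limit rest s' c' (c', s')
    else
      pvAinner primesAll limit rest s' c' st

-- outer i-loop over suffixes: primes[i] is the head, range(i+1, len(primes)) is the tail
def pvAouter (primesAll : List Int) (limit : Int) : List Int → Nat × Int → Nat × Int
  | [], st => st
  | q :: rest, st => pvAouter primesAll limit rest (pvAinner primesAll limit rest q 1 st)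

def find_prime_with_most_consecutive_primes (limit : Int) : Int :=
  let primes := sieve_of_eratosthenes limit
  (pvAouter primes limit primes (0, 0)).2

-- ===== PORT B =====
-- the prefix list after the leading 0: acc-carrying append loop
def pvPrefixGo (acc : Int) : List Int → List Int
  | [] => []
  | q :: rest => (acc + q) :: pvPrefixGo (acc + q) rest

-- inner start-loop: break → none, return s → some s (start/length are nonnegative, carried as Nat)
def pvBstarts (pre pset : List Int) (limit : Int) (L : Nat) : List Nat → Option Int
  | [] => none
  | st :: rest =>
    let s := pre.getD (st + L) 0 - pre.getD st 0
    if s > limit then none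
    else if PySem.Set.contains pset s then some s
    else pvBstarts pre pset limit L rest

-- for length in range(n, 1, -1): a count-down loop, stopping below length 2
def pvBlengths (pre pset : List Int) (limit : Int) (n : Nat) : Nat → Option Int
  | 0 => none
  | 1 => none
  | (L + 2) =>
    match pvBstarts pre pset limit (L + 2) (List.range (n - (L + 2) + 1)) with
    | some s => some s
    | none => pvBlengths pre pset limit n (L + 1)

def find_prime_with_most_consecutive_primes_alt (limit : Int) : Int :=
  let primes := sieve_of_eratosthenes limit
  let n := primes.length
  let pre := 0 :: pvPrefixGo 0 primes
  let pset := PySem.Set.ofList primes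
  (pvBlengths pre pset limit n n).getD 0

-- ===== PRECONDITION & SPEC =====
-- Pre_ admits exactly the inputs where Python A returns normally; below it the sieve raises IndexError
-- (the bool list [True]*limit is too short for the initial assignments).
def Pre_find_prime_with_most_consecutive_primes (limit : Int) : Prop := 2 ≤ limit
instance (limit : Int) : Decidable (Pre_find_prime_with_most_consecutive_primes limit) := by
  unfold Pre_find_prime_with_most_consecutive_primes; infer_instance
def pvWitness_find_prime_with_most_consecutive_primes : Int := 30

def Spec_find_prime_with_most_consecutive_primes (limit : Int) (out : Int) : Prop := out = find_prime_with_most_consecutive_primes_alt limit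
instance (limit : Int) (out : Int) : Decidable (Spec_find_prime_with_most_consecutive_primes limit out) := by unfold Spec_find_prime_with_most_consecutive_primes; infer_instance

-- ===== CLAIM (what is proved, stated in full; the proofs are below) =====
def Claim_equal_find_prime_with_most_consecutive_primes : Prop := ∀ (limit : Int), Dom_find_prime_with_most_consecutive_primes limit → Pre_find_prime_with_most_consecutive_primes limit → Spec_find_prime_with_most_consecutive_primes limit (find_prime_with_most_consecutive_primes limit)

-- ===== LEMMAS AND PROOFS =====

-- sum of the window of length L starting at index i
def pvW (P : List Int) (i L : Nat) : Int := ((P.drop i).take L).sum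

-- a window qualifies: length ≥ 2, in range, sum ≤ limit, and the sum is itself in the prime list
def pvGood (P : List Int) (limit : Int) (i L : Nat) : Prop :=
  2 ≤ L ∧ i + L ≤ P.length ∧ pvW P i L ≤ limit ∧ pvW P i L ∈ P

-- the value both programs return: 0 if no window qualifies, else the sum of the longest
-- qualifying window, earliest start on ties
def pvResOK (P : List Int) (limit : Int) (r : Int) : Prop :=
  (r = 0 ∧ ∀ i L, ¬ pvGood P limit i L) ∨
  (∃ i L, pvGood P limit i L ∧ r = pvW P i L ∧
    ∀ i' L', pvGood P limit i' L' → (L' < L ∨ (L' = L ∧ i ≤ i')))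

theorem pvResOK_unique {P : List Int} {limit r r' : Int}
    (h : pvResOK P limit r) (h' : pvResOK P limit r') : r = r' := by
  rcases h with ⟨h0, hno⟩ | ⟨i, L, hg, hr, hmax⟩
  · rcases h' with ⟨h0', _⟩ | ⟨i', L', hg', _, _⟩
    · omega
    · exact absurd hg' (hno i' L')
  · rcases h' with ⟨h0', hno'⟩ | ⟨i', L', hg', hr', hmax'⟩
    · exact absurd hg (hno' i L)
    · have h1 := hmax i' L' hg'
      have h2 := hmax' i L hg
      have : i = i' ∧ L = L' := by omega
      rw [hr, hr', this.1, this.2]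

theorem pvW_succ (P : List Int) (i L : Nat) (h : i + L < P.length) :
    pvW P i (L + 1) = pvW P i L + P.getD (i + L) 0 := by
  have hlt : L < (P.drop i).length := by simp; omega
  unfold pvW
  rw [List.take_add_one, List.sum_append, List.getElem?_eq_getElem hlt]
  simp [List.getElem_drop, List.getD_eq_getElem?_getD, List.getElem?_eq_getElem h]

theorem pvGetD_mem (P : List Int) (k : Nat) (h : k < P.length) : P.getD k 0 ∈ P := by
  rw [List.getD_eq_getElem?_getD, List.getElem?_eq_getElem h]
  exact List.getElem_mem h

theorem pvW_mono_len {P : List Int} (hpos : ∀ x ∈ P, 0 ≤ x) (i a b : Nat)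
    (hab : a ≤ b) (hb : i + b ≤ P.length) : pvW P i a ≤ pvW P i b := by
  induction b with
  | zero =>
    have : a = 0 := by omega
    subst this; exact le_refl _
  | succ b ih =>
    rcases Nat.lt_or_ge a (b+1) with hlt | hge
    · have h1 : pvW P i b ≤ pvW P i (b+1) := by
        rw [pvW_succ P i b (by omega)]
        have := hpos _ (pvGetD_mem P (i+b) (by omega))
        omega
      exact le_trans (ih (by omega) (by omega)) h1
    · have : a = b + 1 := by omega
      subst this; exact le_refl _

theorem pvW_mono_start {P : List Int} (hs : P.Pairwise (· < ·)) (i i' L : Nat)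
    (hii : i ≤ i') (hb : i' + L ≤ P.length) : pvW P i L ≤ pvW P i' L := by
  have hget := (List.pairwise_iff_getElem).mp hs
  induction L with
  | zero => simp [pvW]
  | succ L ih =>
    rw [pvW_succ P i L (by omega), pvW_succ P i' L (by omega)]
    have h2 : P.getD (i+L) 0 ≤ P.getD (i'+L) 0 := by
      rcases Nat.eq_or_lt_of_le hii with he | hlt
      · subst he; exact le_refl _
      · have hl1 : i + L < P.length := by omega
        have hl2 : i' + L < P.length := by omega
        have := hget (i+L) (i'+L) hl1 hl2 (by omega)
        rw [List.getD_eq_getElem?_getD, List.getD_eq_getElem?_getD,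
          List.getElem?_eq_getElem hl1, List.getElem?_eq_getElem hl2]
        simpa using le_of_lt this
    have := ih (by omega)
    omega

theorem pvSieve_pos (n : Int) : ∀ x ∈ sieve_of_eratosthenes n, 0 ≤ x := by
  intro x hx
  simp only [sieve_of_eratosthenes, List.mem_map, List.mem_filter] at hx
  obtain ⟨q, ⟨hq, _⟩, rfl⟩ := hx
  rw [PySem.List.mem_enumerate_iff] at hq
  obtain ⟨k, hk, rfl⟩ := hq
  simp

theorem pvSieve_sorted (n : Int) : (sieve_of_eratosthenes n).Pairwise (· < ·) := by
  unfold sieve_of_eratosthenes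
  rw [List.pairwise_map]
  exact (PySem.List.pairwise_lt_enumerate _ 0).filter _

-- invariant of A's fold: the state is the best qualifying window among those already scanned
def pvInvA (P : List Int) (limit : Int) (S : Nat → Nat → Prop) (st : Nat × Int) : Prop :=
  (st = (0, 0) ∧ ∀ i L, S i L → ¬ pvGood P limit i L) ∨
  (∃ i L, pvGood P limit i L ∧ S i L ∧ st = (L, pvW P i L) ∧
    ∀ i' L', S i' L' → pvGood P limit i' L' → (L' < L ∨ (L' = L ∧ i ≤ i')))

theorem pvInvA_mono {P : List Int} {limit : Int} {S S' : Nat → Nat → Prop} {st : Nat × Int}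
    (hSS : ∀ i L, pvGood P limit i L → (S i L ↔ S' i L)) (h : pvInvA P limit S st) :
    pvInvA P limit S' st := by
  rcases h with ⟨h0, hno⟩ | ⟨i, L, hg, hS, hst, hmax⟩
  · exact Or.inl ⟨h0, fun i L hS' hg => hno i L ((hSS i L hg).mpr hS') hg⟩
  · exact Or.inr ⟨i, L, hg, (hSS i L hg).mp hS, hst,
      fun i' L' hS' hg' => hmax i' L' ((hSS i' L' hg').mpr hS') hg'⟩

theorem pvAinner_cons (P : List Int) (limit : Int) (q : Int) (rest : List Int)
    (s : Int) (c : Nat) (st : Nat × Int) :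
    pvAinner P limit (q :: rest) s c st =
      (if s + q > limit then st
       else if P.contains (s + q) && decide (st.1 < c + 1) then
         pvAinner P limit rest (s + q) (c + 1) (c + 1, s + q)
       else pvAinner P limit rest (s + q) (c + 1) st) := rfl

theorem pvAinner_inv {P : List Int} {limit : Int} (hpos : ∀ x ∈ P, 0 ≤ x) (i : Nat) :
    ∀ (rest : List Int) (c : Nat) (s : Int) (st : Nat × Int),
      rest = P.drop (i + c) → 1 ≤ c → s = pvW P i c →
      pvInvA P limit (fun i' L' => i' < i ∨ (i' = i ∧ L' ≤ c)) st →
      pvInvA P limit (fun i' _ => i' < i + 1) (pvAinner P limit rest s c st) := by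
  intro rest
  induction rest with
  | nil =>
    intro c s st hr _ _ hinv
    have hlen : P.length ≤ i + c := by
      have := List.drop_eq_nil_iff.mp hr.symm
      omega
    refine pvInvA_mono (fun i' L' hg => ?_) hinv
    constructor
    · intro h; omega
    · intro h
      rcases Nat.lt_or_ge i' i with h1 | h1
      · exact Or.inl h1
      · have hi : i' = i := by omega
        subst hi
        exact Or.inr ⟨rfl, by have := hg.2.1; omega⟩
  | cons q rest' ih =>
    intro c s st hr hc hs hinv
    have hlen : i + c < P.length := by
      by_contra hcon
      rw [List.drop_eq_nil_iff.mpr (by omega)] at hr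
      simp at hr
    have hq : P.getD (i + c) 0 = q := by
      have h0 : (P.drop (i + c))[0]? = some q := by rw [← hr]; rfl
      rw [List.getElem?_drop] at h0
      simp only [Nat.add_zero] at h0
      simp [List.getD_eq_getElem?_getD, h0]
    have hrest' : rest' = P.drop (i + c + 1) := by
      have : (P.drop (i + c)).tail = rest' := by rw [← hr]; rfl
      rw [List.tail_drop] at this
      exact this.symm
    have hs' : s + q = pvW P i (c + 1) := by
      rw [pvW_succ P i c hlen, ← hs, hq]
    rw [pvAinner_cons]
    by_cases hgt : s + q > limit
    · rw [if_pos hgt]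
      refine pvInvA_mono (fun i' L' hg => ?_) hinv
      constructor
      · intro h; omega
      · intro h
        rcases Nat.lt_or_ge i' i with h1 | h1
        · exact Or.inl h1
        · have hi : i' = i := by omega
          refine Or.inr ⟨hi, ?_⟩
          by_contra hLc
          have hle : c + 1 ≤ L' := by omega
          have h5 := pvW_mono_len hpos i' (c+1) L' hle (by have := hg.2.1; omega)
          have h7 := le_trans h5 hg.2.2.1
          rw [hi, ← hs'] at h7
          omega
    · rw [if_neg hgt]
      by_cases hb : P.contains (s + q) && decide (st.1 < c + 1)
      · rw [if_pos hb]
        simp only [Bool.and_eq_true, decide_eq_true_eq, List.contains_iff_mem] at hb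
        obtain ⟨hmem, hlt⟩ := hb
        refine ih (c+1) (s+q) (c+1, s+q) (by rw [hrest', Nat.add_assoc]) (by omega) hs' ?_
        refine Or.inr ⟨i, c+1, ?_, Or.inr ⟨rfl, le_refl _⟩, by rw [hs'], ?_⟩
        · exact ⟨by omega, by omega, by rw [← hs']; omega, by rw [← hs']; exact hmem⟩
        · intro i' L' hS' hg'
          rcases hS' with h1 | ⟨h1, h2⟩
          · rcases hinv with ⟨_, hno⟩ | ⟨i₀, L₀, _, hS₀, hst₀, hmax₀⟩
            · exact absurd hg' (hno i' L' (Or.inl h1))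
            · have := hmax₀ i' L' (Or.inl h1) hg'
              have hst1 : st.1 = L₀ := by rw [hst₀]
              omega
          · subst h1
            rcases Nat.lt_or_ge L' (c+1) with h3 | h3
            · rcases hinv with ⟨_, hno⟩ | ⟨i₀, L₀, _, hS₀, hst₀, hmax₀⟩
              · exact absurd hg' (hno i' L' (Or.inr ⟨rfl, by omega⟩))
              · have := hmax₀ i' L' (Or.inr ⟨rfl, by omega⟩) hg'
                have hst1 : st.1 = L₀ := by rw [hst₀]
                omega
            · have : L' = c + 1 := by omega
              omega
      · rw [if_neg hb]
        refine ih (c+1) (s+q) st (by rw [hrest', Nat.add_assoc]) (by omega) hs' ?_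
        simp only [Bool.and_eq_true, decide_eq_true_eq, List.contains_iff_mem, not_and] at hb
        by_cases hmem : (s + q) ∈ P
        · have hge : c + 1 ≤ st.1 := by have := hb hmem; omega
          rcases hinv with ⟨hst0, _⟩ | ⟨i₀, L₀, hg₀, hS₀, hst₀, hmax₀⟩
          · rw [hst0] at hge
            simp at hge
          · have hst1 : st.1 = L₀ := by rw [hst₀]
            refine Or.inr ⟨i₀, L₀, hg₀, ?_, hst₀, ?_⟩
            · rcases hS₀ with h1 | ⟨h1, h2⟩
              · exact Or.inl h1
              · exact Or.inr ⟨h1, by omega⟩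
            · intro i' L' hS' hg'
              rcases hS' with h1 | ⟨h1, h2⟩
              · exact hmax₀ i' L' (Or.inl h1) hg'
              · subst h1
                rcases Nat.lt_or_ge L' (c+1) with h3 | h3
                · exact hmax₀ i' L' (Or.inr ⟨rfl, by omega⟩) hg'
                · have hL' : L' = c + 1 := by omega
                  rcases Nat.lt_or_ge L' L₀ with h4 | h4
                  · exact Or.inl h4
                  · refine Or.inr ⟨by omega, ?_⟩
                    rcases hS₀ with h5 | ⟨h5, h6⟩
                    · omega
                    · omega
        · refine pvInvA_mono (fun i' L' hg => ?_) hinv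
          constructor
          · intro h
            rcases h with h1 | ⟨h1, h2⟩
            · exact Or.inl h1
            · exact Or.inr ⟨h1, by omega⟩
          · intro h
            rcases h with h1 | ⟨h1, h2⟩
            · exact Or.inl h1
            · subst h1
              refine Or.inr ⟨rfl, ?_⟩
              rcases Nat.lt_or_ge L' (c+1) with h3 | h3
              · omega
              · exfalso
                have hL' : L' = c + 1 := by omega
                have hmem' := hg.2.2.2
                rw [hL', ← hs'] at hmem'
                exact hmem hmem'

theorem pvAouter_inv {P : List Int} {limit : Int} (hpos : ∀ x ∈ P, 0 ≤ x) :
    ∀ (l : List Int) (k : Nat) (st : Nat × Int), l = P.drop k →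
      pvInvA P limit (fun i' _ => i' < k) st →
      pvInvA P limit (fun _ _ => True) (pvAouter P limit l st) := by
  intro l
  induction l with
  | nil =>
    intro k st hr hinv
    have hlen : P.length ≤ k := by
      have := List.drop_eq_nil_iff.mp hr.symm
      omega
    refine pvInvA_mono (fun i' L' hg => ?_) hinv
    have := hg.1
    have := hg.2.1
    constructor
    · intro _; trivial
    · intro _; omega
  | cons q rest ih =>
    intro k st hr hinv
    have hlen : k < P.length := by
      by_contra hcon
      rw [List.drop_eq_nil_iff.mpr (by omega)] at hr
      simp at hr
    have hq : P.getD k 0 = q := by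
      have h0 : (P.drop k)[0]? = some q := by rw [← hr]; rfl
      rw [List.getElem?_drop] at h0
      simp only [Nat.add_zero] at h0
      simp [List.getD_eq_getElem?_getD, h0]
    have hrest : rest = P.drop (k + 1) := by
      have : (P.drop k).tail = rest := by rw [← hr]; rfl
      rw [List.tail_drop] at this
      exact this.symm
    show pvInvA P limit (fun _ _ => True) (pvAouter P limit rest (pvAinner P limit rest q 1 st))
    refine ih (k+1) _ hrest ?_
    have hq1 : q = pvW P k 1 := by
      rw [pvW_succ P k 0 (by omega)]
      rw [List.getD_eq_getElem?_getD] at hq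
      simp [pvW]
      exact hq.symm
    have hinner := pvAinner_inv (limit := limit) hpos k rest 1 q st (by rw [hrest]) (le_refl 1) hq1 ?_
    · exact hinner
    · refine pvInvA_mono (fun i' L' hg => ?_) hinv
      have := hg.1
      constructor
      · intro h; exact Or.inl h
      · intro h
        rcases h with h1 | ⟨h1, h2⟩
        · exact h1
        · omega

theorem pvA_resOK (limit : Int) :
    pvResOK (sieve_of_eratosthenes limit) limit (find_prime_with_most_consecutive_primes limit) := by
  have hpos := pvSieve_pos limit
  have hfin := pvAouter_inv (P := sieve_of_eratosthenes limit) (limit := limit) hpos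
    (sieve_of_eratosthenes limit) 0 (0, 0) (by simp)
    (Or.inl ⟨rfl, fun i L h => absurd h (Nat.not_lt_zero i)⟩)
  rcases hfin with ⟨hst, hno⟩ | ⟨i, L, hg, _, hst, hmax⟩
  · refine Or.inl ⟨?_, fun i L => hno i L trivial⟩
    show (pvAouter _ limit _ (0, 0)).2 = 0
    rw [hst]
  · refine Or.inr ⟨i, L, hg, ?_, fun i' L' hg' => hmax i' L' trivial hg'⟩
    show (pvAouter _ limit _ (0, 0)).2 = pvW _ i L
    rw [hst]

theorem pvPrefixGo_getD : ∀ (l : List Int) (acc : Int) (k : Nat), k < l.length →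
    (pvPrefixGo acc l).getD k 0 = acc + (l.take (k + 1)).sum := by
  intro l
  induction l with
  | nil => intro acc k h; simp at h
  | cons q rest ih =>
    intro acc k h
    cases k with
    | zero => simp [pvPrefixGo]
    | succ k =>
      simp only [pvPrefixGo, List.getD_cons_succ]
      rw [ih (acc + q) k (by simpa using Nat.lt_of_succ_lt_succ h)]
      simp [List.take_succ_cons]
      ring

theorem pvPrefix_getD (P : List Int) :
    ∀ k, k ≤ P.length → (0 :: pvPrefixGo 0 P).getD k 0 = (P.take k).sum := by
  intro k hk
  cases k with
  | zero => simp
  | succ k =>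
    simp only [List.getD_cons_succ]
    rw [pvPrefixGo_getD P 0 k (by omega)]
    simp

theorem pvPrefix_window (P : List Int) (st L : Nat) (h : st + L ≤ P.length) :
    (0 :: pvPrefixGo 0 P).getD (st + L) 0 - (0 :: pvPrefixGo 0 P).getD st 0 = pvW P st L := by
  rw [pvPrefix_getD P (st + L) h, pvPrefix_getD P st (by omega)]
  rw [List.take_add, List.sum_append]
  unfold pvW; ring

theorem pvBstarts_cons (pre pset : List Int) (limit : Int) (L : Nat) (a : Nat) (rest : List Nat) :
    pvBstarts pre pset limit L (a :: rest) =
      (if pre.getD (a + L) 0 - pre.getD a 0 > limit then none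
       else if PySem.Set.contains pset (pre.getD (a + L) 0 - pre.getD a 0) then
         some (pre.getD (a + L) 0 - pre.getD a 0)
       else pvBstarts pre pset limit L rest) := rfl

theorem pvBstarts_spec {P : List Int} {limit : Int} (hs : P.Pairwise (· < ·))
    {pset : List Int} (hset : ∀ x, PySem.Set.contains pset x = true ↔ x ∈ P)
    (L : Nat) (hL2 : 2 ≤ L) (hLn : L ≤ P.length) :
    ∀ (m a : Nat), a + m = P.length - L + 1 →
      (pvBstarts (0 :: pvPrefixGo 0 P) pset limit L (List.range' a m) = none ∧
        ∀ i, a ≤ i → ¬ pvGood P limit i L) ∨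
      (∃ i, pvGood P limit i L ∧
        pvBstarts (0 :: pvPrefixGo 0 P) pset limit L (List.range' a m) = some (pvW P i L) ∧
        a ≤ i ∧ ∀ i', a ≤ i' → pvGood P limit i' L → i ≤ i') := by
  intro m
  induction m with
  | zero =>
    intro a ha
    refine Or.inl ⟨rfl, fun i hi hg => ?_⟩
    have := hg.2.1
    omega
  | succ m ih =>
    intro a ha
    have haL : a + L ≤ P.length := by omega
    have hw : (0 :: pvPrefixGo 0 P).getD (a + L) 0 - (0 :: pvPrefixGo 0 P).getD a 0 = pvW P a L :=
      pvPrefix_window P a L haL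
    rw [List.range'_succ, pvBstarts_cons, hw]
    by_cases hgt : pvW P a L > limit
    · rw [if_pos hgt]
      refine Or.inl ⟨rfl, fun i hi hg => ?_⟩
      have := pvW_mono_start hs a i L hi hg.2.1
      have := hg.2.2.1
      omega
    · rw [if_neg hgt]
      by_cases hmem : PySem.Set.contains pset (pvW P a L)
      · rw [if_pos hmem]
        refine Or.inr ⟨a, ⟨hL2, haL, by omega, (hset _).mp hmem⟩, rfl, le_refl a,
          fun i' hi' _ => hi'⟩
      · rw [if_neg hmem]
        have hnga : ¬ pvGood P limit a L := by
          intro hg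
          exact hmem ((hset _).mpr hg.2.2.2)
        rcases ih (a+1) (by omega) with ⟨heq, hno⟩ | ⟨i, hg, heq, hai, hmin⟩
        · refine Or.inl ⟨heq, fun i hi hg => ?_⟩
          rcases Nat.eq_or_lt_of_le hi with he | hlt
          · exact hnga (he ▸ hg)
          · exact hno i hlt hg
        · refine Or.inr ⟨i, hg, heq, by omega, fun i' hi' hg' => ?_⟩
          rcases Nat.eq_or_lt_of_le hi' with he | hlt
          · exact absurd (he ▸ hg') hnga
          · exact hmin i' hlt hg'

theorem pvBlengths_spec {P : List Int} {limit : Int} (hs : P.Pairwise (· < ·))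
    {pset : List Int} (hset : ∀ x, PySem.Set.contains pset x = true ↔ x ∈ P) :
    ∀ (L : Nat), L ≤ P.length → (∀ i' L', pvGood P limit i' L' → L' ≤ L) →
      pvResOK P limit ((pvBlengths (0 :: pvPrefixGo 0 P) pset limit P.length L).getD 0) := by
  intro L
  induction L using Nat.strong_induction_on with
  | _ L ih =>
    intro hLn hmax
    match L, hLn, hmax, ih with
    | 0, hLn, hmax, ih =>
      refine Or.inl ⟨rfl, fun i L' hg => ?_⟩
      have h1 := hg.1
      have := hmax i L' hg
      omega
    | 1, hLn, hmax, ih =>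
      refine Or.inl ⟨rfl, fun i L' hg => ?_⟩
      have h1 := hg.1
      have := hmax i L' hg
      omega
    | (L + 2), hLn, hmax, ih =>
      have hstarts := pvBstarts_spec (limit := limit) hs hset (L + 2) (by omega) hLn
        (P.length - (L + 2) + 1) 0 (by omega)
      rw [← List.range_eq_range'] at hstarts
      rcases hstarts with ⟨heq, hno⟩ | ⟨i, hg, heq, _, hmin⟩
      · show pvResOK P limit ((pvBlengths _ pset limit P.length (L + 2)).getD 0)
        rw [pvBlengths, heq]
        exact ih (L + 1) (by omega) (by omega) (fun i' L' hg' => by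
          have h1 := hmax i' L' hg'
          rcases Nat.eq_or_lt_of_le h1 with he | hlt
          · exact absurd (he ▸ hg') (fun hgg => hno i' (Nat.zero_le i') (he ▸ hgg))
          · omega)
      · show pvResOK P limit ((pvBlengths _ pset limit P.length (L + 2)).getD 0)
        rw [pvBlengths, heq]
        refine Or.inr ⟨i, L + 2, hg, rfl, fun i' L' hg' => ?_⟩
        have h1 := hmax i' L' hg'
        rcases Nat.eq_or_lt_of_le h1 with he | hlt
        · exact Or.inr ⟨he, hmin i' (Nat.zero_le i') (he ▸ hg')⟩
        · exact Or.inl hlt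

theorem pvB_resOK (limit : Int) :
    pvResOK (sieve_of_eratosthenes limit) limit (find_prime_with_most_consecutive_primes_alt limit) := by
  have hs := pvSieve_sorted limit
  have hset : ∀ x, PySem.Set.contains (PySem.Set.ofList (sieve_of_eratosthenes limit)) x = true ↔
      x ∈ sieve_of_eratosthenes limit := by
    intro x
    rw [PySem.Set.contains_iff, PySem.Set.mem_ofList]
  exact pvBlengths_spec hs hset (sieve_of_eratosthenes limit).length (le_refl _)
    (fun i' L' hg' => by have := hg'.2.1; omega)

-- ===== VERDICT (by name: the statement is the Claim_ definition above) =====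
theorem find_prime_with_most_consecutive_primes_spec : Claim_equal_find_prime_with_most_consecutive_primes := by
  intro limit _ _
  exact pvResOK_unique (pvA_resOK limit) (pvB_resOK limit)
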